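-- pv_equiv track=rewrite | github.com/sebas-mora28/2048_game | Adyacentes.py | espacio_aux
-- ===== SOURCE A (Python) =====
-- def espacio_aux(matriz,sub,sub2):
--     if (sub !=4):
--         if (sub2 !=4):
--             if (matriz[sub][sub2] == 0):
--                 return [[sub,sub2]] + espacio_aux(matriz,sub,sub2+1)
--             else:
--                 return espacio_aux(matriz,sub,sub2+1)
--         else:
--             return espacio_aux(matriz,sub+1,0)
--     return []
-- ===== SOURCE B (Python) =====
-- def espacio_aux(matriz, sub, sub2):
--     if sub == 4:
--         return []
--     res = [[sub, j] for j in range(sub2, 4) if matriz[sub][j] == 0]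
--     for i in range(sub + 1, 4):
--         for j in range(4):
--             if matriz[i][j] == 0:
--                 res.append([i, j])
--     return res
-- ===== Notes on version B (the rewrite author's own statement) =====
-- stated objective: idiomatic
-- what changed: Replaces the single index-threading recursion with staged iteration: a comprehension collects the zeros of the partial first row (columns sub2..3), then plain nested for-loops over range(sub+1,4) x range(4) append the zeros of the remaining full rows.
import Mathlib
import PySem

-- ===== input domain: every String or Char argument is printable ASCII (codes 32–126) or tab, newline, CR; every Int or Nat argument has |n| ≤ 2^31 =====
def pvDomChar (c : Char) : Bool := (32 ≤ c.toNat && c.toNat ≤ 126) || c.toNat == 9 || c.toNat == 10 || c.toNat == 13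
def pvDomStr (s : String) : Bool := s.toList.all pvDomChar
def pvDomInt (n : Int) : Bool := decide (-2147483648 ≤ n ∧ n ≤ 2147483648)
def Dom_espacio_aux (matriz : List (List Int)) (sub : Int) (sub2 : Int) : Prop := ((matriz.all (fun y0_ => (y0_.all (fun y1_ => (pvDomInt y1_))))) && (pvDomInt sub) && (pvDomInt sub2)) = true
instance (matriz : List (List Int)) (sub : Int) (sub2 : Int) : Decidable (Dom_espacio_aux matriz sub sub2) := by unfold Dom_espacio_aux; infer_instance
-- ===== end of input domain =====

-- B replaces A's single index-threading recursion by staged iteration: a comprehension for the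
-- partial first row, then nested for-loops over the remaining full rows; equality of return
-- values is proved on Pre_ (where A returns).

-- ===== PORT A =====
-- Literal port of the recursion. `fuel` only makes the recursion structural (it strictly
-- dominates the recursion depth wherever the Python returns); the `none` branch is reached
-- exactly where the Python raises IndexError, and fuel 0 / sub > 4 / sub2 > 4 exactly where the
-- Python recursion never returns — all outside Pre_espacio_aux.
def espacio_auxGo (matriz : List (List Int)) (fuel : Nat) (sub : Int) (sub2 : Int) : List (List Int) :=
  match fuel with
  | 0 => []
  | fuel + 1 =>
    if sub ≠ 4 then
      if sub2 ≠ 4 then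
        match (PySem.List.pyGet? matriz sub).bind (fun r => PySem.List.pyGet? r sub2) with
        | some v =>
          if v = 0 then [sub, sub2] :: espacio_auxGo matriz fuel sub (sub2 + 1)
          else espacio_auxGo matriz fuel sub (sub2 + 1)
        | none => []  -- Python: IndexError (outside Pre_)
      else espacio_auxGo matriz fuel (sub + 1) 0
    else []

def espacio_aux (matriz : List (List Int)) (sub : Int) (sub2 : Int) : List (List Int) :=
  espacio_auxGo matriz (((4 - sub).toNat + 1) * 6 + (4 - sub2).toNat + 1) sub sub2

-- ===== PORT B =====
-- The comprehension becomes filter+map over pyRange, the two for-loops become two nested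
-- foldls appending to the accumulator. matriz[i][j] is ported as pyGetD/pyGetD (the defaults
-- are never read: Pre_ keeps every index in range).
def espacio_aux_alt (matriz : List (List Int)) (sub : Int) (sub2 : Int) : List (List Int) :=
  if sub = 4 then []
  else
    let res := ((PySem.List.pyRange sub2 4 1).filter
        (fun j => decide (PySem.List.pyGetD (PySem.List.pyGetD matriz sub []) j 1 = 0))).map
      (fun j => [sub, j])
    (PySem.List.pyRange (sub + 1) 4 1).foldl (fun acc i =>
      (PySem.List.pyRange 0 4 1).foldl (fun acc2 j =>
        if PySem.List.pyGetD (PySem.List.pyGetD matriz i []) j 1 = 0 then acc2 ++ [[i, j]]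
        else acc2) acc) res

-- ===== PRECONDITION & SPEC =====
-- row i of matriz exists (Python indexing, negative wrap included), starting column s is in
-- range, and the row has the ≥ 4 cells the scan will touch
def rowOK (matriz : List (List Int)) (i : Int) (s : Int) : Bool :=
  match PySem.List.pyGet? matriz i with
  | none => false
  | some r => decide (-(r.length : Int) ≤ s) && decide (4 ≤ r.length)

-- Pre_ holds exactly where the Python A returns normally: either sub = 4 (immediate []), or the
-- scan stays in range — row sub from column sub2 (unless sub2 = 4) and rows sub+1..3 from 0.
def Pre_espacio_aux (matriz : List (List Int)) (sub : Int) (sub2 : Int) : Prop :=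
  sub = 4 ∨ (sub < 4 ∧ -(matriz.length : Int) - 1 ≤ sub ∧ sub2 ≤ 4 ∧
    (sub2 = 4 ∨ rowOK matriz sub sub2 = true) ∧
    ∀ i ∈ PySem.List.pyRange (sub + 1) 4 1, rowOK matriz i 0 = true)

instance (matriz : List (List Int)) (sub : Int) (sub2 : Int) : Decidable (Pre_espacio_aux matriz sub sub2) := by
  unfold Pre_espacio_aux; infer_instance

def pvWitness_espacio_aux : List (List Int) × Int × Int :=
  ([[0, 1, 2, 0], [1, 1, 1, 1], [0, 0, 0, 0], [5, 0, 5, 0]], 0, 0)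

def Spec_espacio_aux (matriz : List (List Int)) (sub : Int) (sub2 : Int) (out : List (List Int)) : Prop := out = espacio_aux_alt matriz sub sub2
instance (matriz : List (List Int)) (sub : Int) (sub2 : Int) (out : List (List Int)) : Decidable (Spec_espacio_aux matriz sub sub2 out) := by unfold Spec_espacio_aux; infer_instance

-- ===== CLAIM (what is proved, stated in full; the proofs are below) =====
def Claim_equal_espacio_aux : Prop := ∀ (matriz : List (List Int)) (sub : Int) (sub2 : Int), Dom_espacio_aux matriz sub sub2 → Pre_espacio_aux matriz sub sub2 → Spec_espacio_aux matriz sub sub2 (espacio_aux matriz sub sub2)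

-- ===== LEMMAS AND PROOFS =====

-- the cells collected in row i when the column scan starts at s
def pvRow (m : List (List Int)) (i : Int) (s : Int) : List (List Int) :=
  ((PySem.List.pyRange s 4 1).filter
      (fun j => decide (PySem.List.pyGetD (PySem.List.pyGetD m i []) j 1 = 0))).map
    (fun j => [i, j])

-- the common row-major value both programs compute: rows sub..3, row sub starting at sub2
def G (m : List (List Int)) (sub sub2 : Int) : List (List Int) :=
  (PySem.List.pyRange sub 4 1).flatMap (fun i => pvRow m i (if i = sub then sub2 else 0))

theorem G_four (m : List (List Int)) (sub2 : Int) : G m 4 sub2 = [] := by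
  rw [G, PySem.List.pyRange_one_eq_nil (by omega)]; rfl

theorem G_lt (m : List (List Int)) (sub sub2 : Int) (h : sub < 4) :
    G m sub sub2 = pvRow m sub sub2 ++ (PySem.List.pyRange (sub + 1) 4 1).flatMap (fun i => pvRow m i 0) := by
  rw [G, PySem.List.pyRange_one_cons h]
  simp only [List.flatMap_cons, if_true]
  congr 1
  apply List.flatMap_congr
  intro i hi
  rw [PySem.List.mem_pyRange_one] at hi
  have : i ≠ sub := by omega
  simp [this]

theorem G_step_row (m : List (List Int)) (sub : Int) (h : sub < 4) :
    G m sub 4 = G m (sub + 1) 0 := by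
  rw [G_lt m sub 4 h]
  have h0 : pvRow m sub 4 = [] := by
    simp [pvRow, PySem.List.pyRange_one_eq_nil (by omega : (4:Int) ≤ 4)]
  rw [h0, List.nil_append]
  by_cases h4 : sub + 1 = 4
  · rw [h4, G_four, PySem.List.pyRange_one_eq_nil (by omega)]; rfl
  · rw [G_lt m (sub + 1) 0 (by omega), PySem.List.pyRange_one_cons (by omega : sub + 1 < 4)]
    simp [List.flatMap_cons]

theorem G_step_col (m : List (List Int)) (sub sub2 : Int) (r : List Int) (v : Int)
    (h : sub < 4) (h2 : sub2 < 4)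
    (hr : PySem.List.pyGet? m sub = some r) (hv : PySem.List.pyGet? r sub2 = some v) :
    G m sub sub2 = (if v = 0 then [[sub, sub2]] else []) ++ G m sub (sub2 + 1) := by
  rw [G_lt m sub sub2 h, G_lt m sub (sub2 + 1) h]
  have hcell : PySem.List.pyGetD (PySem.List.pyGetD m sub []) sub2 1 = v := by
    simp [PySem.List.pyGetD, hr, hv]
  have hrow : pvRow m sub sub2 = (if v = 0 then [[sub, sub2]] else []) ++ pvRow m sub (sub2 + 1) := by
    unfold pvRow
    rw [PySem.List.pyRange_one_cons h2, List.filter_cons, hcell]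
    by_cases hz : v = 0 <;> simp [hz]
  rw [hrow, List.append_assoc]

theorem rowOK_spec (m : List (List Int)) (i s : Int) (h : rowOK m i s = true) :
    ∃ r, PySem.List.pyGet? m i = some r ∧ -(r.length : Int) ≤ s ∧ 4 ≤ r.length := by
  unfold rowOK at h
  cases hg : PySem.List.pyGet? m i with
  | none => rw [hg] at h; simp at h
  | some r =>
    rw [hg] at h
    simp at h
    exact ⟨r, rfl, by omega, by omega⟩

theorem rowOK_mono (m : List (List Int)) (i s s' : Int) (hss : s ≤ s')
    (h : rowOK m i s = true) : rowOK m i s' = true := by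
  unfold rowOK at h ⊢
  cases hg : PySem.List.pyGet? m i with
  | none => rw [hg] at h; simp at h
  | some r =>
    rw [hg] at h
    simp at h ⊢
    omega

theorem pyGet?_some_of_inRange {α : Type} (xs : List α) (i : Int)
    (h1 : -(xs.length : Int) ≤ i) (h2 : i < (xs.length : Int)) :
    ∃ v, PySem.List.pyGet? xs i = some v := by
  rw [← Option.isSome_iff_exists]
  unfold PySem.List.pyGet? PySem.List.pyIdx?
  split_ifs with ha
  · have hlt : i.toNat < xs.length := by omega
    simp [List.getElem?_eq_getElem hlt]
  · have hlt : xs.length - (-i).toNat < xs.length := by omega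
    simp [List.getElem?_eq_getElem hlt]

-- recursion-depth measure of A's scan; the initial fuel strictly dominates it on Pre_
def msr (sub sub2 : Int) : Nat := (4 - sub).toNat * 6 + (4 - sub2).toNat

-- Pre_ is preserved when the column scan advances
theorem pre_step_col (m : List (List Int)) (sub sub2 : Int) (hs : sub < 4)
    (hb : -(m.length : Int) - 1 ≤ sub) (hs2 : sub2 < 4) (hrOK : rowOK m sub sub2 = true)
    (hrest : ∀ i ∈ PySem.List.pyRange (sub + 1) 4 1, rowOK m i 0 = true) :
    Pre_espacio_aux m sub (sub2 + 1) := by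
  right
  refine ⟨hs, hb, by omega, ?_, hrest⟩
  by_cases h4' : sub2 + 1 = 4
  · exact Or.inl h4'
  · exact Or.inr (rowOK_mono m sub sub2 (sub2 + 1) (by omega) hrOK)

-- Pre_ is preserved when the scan moves to the next row
theorem pre_step_row (m : List (List Int)) (sub : Int) (hs : sub < 4)
    (hrest : ∀ i ∈ PySem.List.pyRange (sub + 1) 4 1, rowOK m i 0 = true) :
    Pre_espacio_aux m (sub + 1) 0 := by
  by_cases h4' : sub + 1 = 4
  · exact Or.inl h4'
  · right
    refine ⟨by omega, ?_, by omega, ?_, ?_⟩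
    · have := hrest (sub + 1) (by rw [PySem.List.mem_pyRange_one]; omega)
      obtain ⟨r, hr, -, -⟩ := rowOK_spec m (sub + 1) 0 this
      -- the row is found by Python indexing, so sub + 1 is not below -len
      by_contra hlt
      have : PySem.List.pyGet? m (sub + 1) = none := by
        unfold PySem.List.pyGet? PySem.List.pyIdx?
        rw [if_neg (by omega), if_neg (by omega)]
        rfl
      rw [this] at hr; simp at hr
    · refine Or.inr (hrest (sub + 1) ?_)
      rw [PySem.List.mem_pyRange_one]; omega
    · intro i hi
      apply hrest
      rw [PySem.List.mem_pyRange_one] at hi ⊢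
      omega

-- the cell A reads exists and is what B reads, on Pre_ with sub < 4, sub2 < 4
theorem cell_spec (m : List (List Int)) (sub sub2 : Int) (hs2 : sub2 < 4)
    (hrOK : rowOK m sub sub2 = true) :
    ∃ r v, PySem.List.pyGet? m sub = some r ∧ PySem.List.pyGet? r sub2 = some v := by
  obtain ⟨r, hr, hlo, hlen⟩ := rowOK_spec m sub sub2 hrOK
  obtain ⟨v, hv⟩ := pyGet?_some_of_inRange r sub2 hlo (by omega)
  exact ⟨r, v, hr, hv⟩

theorem keyA (m : List (List Int)) :
    ∀ (fuel : Nat) (sub sub2 : Int), Pre_espacio_aux m sub sub2 → msr sub sub2 < fuel →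
      espacio_auxGo m fuel sub sub2 = G m sub sub2 := by
  intro fuel
  induction fuel with
  | zero => intro sub sub2 _ hm; exact absurd hm (by omega)
  | succ n ih =>
    intro sub sub2 hp hm
    rw [espacio_auxGo]
    by_cases h4 : sub = 4
    · subst h4
      rw [if_neg (by simp), G_four]
    · obtain ⟨hs, hb, hs2le, hrow, hrest⟩ : sub < 4 ∧ -(m.length : Int) - 1 ≤ sub ∧ sub2 ≤ 4 ∧
          (sub2 = 4 ∨ rowOK m sub sub2 = true) ∧
          ∀ i ∈ PySem.List.pyRange (sub + 1) 4 1, rowOK m i 0 = true := by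
        rcases hp with h | h
        · exact absurd h h4
        · exact h
      rw [if_pos h4]
      by_cases h24 : sub2 = 4
      · subst h24
        rw [if_neg (by simp), G_step_row m sub hs]
        apply ih _ _ (pre_step_row m sub hs hrest)
        unfold msr at hm ⊢; omega
      · have hs2 : sub2 < 4 := by omega
        rw [if_pos h24]
        have hrOK : rowOK m sub sub2 = true := by
          rcases hrow with h | h
          · omega
          · exact h
        obtain ⟨r, v, hr, hv⟩ := cell_spec m sub sub2 hs2 hrOK
        have hbind : (PySem.List.pyGet? m sub).bind (fun r => PySem.List.pyGet? r sub2)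
            = some v := by
          rw [hr]; simpa using hv
        rw [hbind]
        have hred : (match some v with
            | some v => if v = 0 then [sub, sub2] :: espacio_auxGo m n sub (sub2 + 1)
                        else espacio_auxGo m n sub (sub2 + 1)
            | none => ([] : List (List Int)))
            = (if v = 0 then [sub, sub2] :: espacio_auxGo m n sub (sub2 + 1)
               else espacio_auxGo m n sub (sub2 + 1)) := rfl
        have hrec : espacio_auxGo m n sub (sub2 + 1) = G m sub (sub2 + 1) := by
          apply ih _ _ (pre_step_col m sub sub2 hs hb hs2 hrOK hrest)
          unfold msr at hm ⊢; omega
        rw [hred, G_step_col m sub sub2 r v hs hs2 hr hv]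
        by_cases hz : v = 0
        · rw [if_pos hz, if_pos hz, hrec]
          rfl
        · rw [if_neg hz, if_neg hz, hrec, List.nil_append]

-- B's staged iteration computes G directly: the comprehension is pvRow m sub sub2 and the
-- nested loops extend it by the remaining rows' pvRow m i 0, in order.
theorem keyB (m : List (List Int)) (sub sub2 : Int) (hle : sub ≤ 4) :
    espacio_aux_alt m sub sub2 = G m sub sub2 := by
  unfold espacio_aux_alt
  by_cases h4 : sub = 4
  · rw [if_pos h4, h4, G_four]
  · rw [if_neg h4]
    have hinner : ∀ (acc : List (List Int)) (i : Int),
        (PySem.List.pyRange 0 4 1).foldl (fun acc2 j =>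
          if PySem.List.pyGetD (PySem.List.pyGetD m i []) j 1 = 0 then acc2 ++ [[i, j]]
          else acc2) acc = acc ++ pvRow m i 0 := by
      intro acc i
      rw [PySem.List.foldl_append_ite
        (p := fun j => PySem.List.pyGetD (PySem.List.pyGetD m i []) j 1 = 0)
        (f := fun j => [i, j])]
      rfl
    show (PySem.List.pyRange (sub + 1) 4 1).foldl (fun acc i =>
        (PySem.List.pyRange 0 4 1).foldl (fun acc2 j =>
          if PySem.List.pyGetD (PySem.List.pyGetD m i []) j 1 = 0 then acc2 ++ [[i, j]]
          else acc2) acc)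
      (((PySem.List.pyRange sub2 4 1).filter
          (fun j => decide (PySem.List.pyGetD (PySem.List.pyGetD m sub []) j 1 = 0))).map
        (fun j => [sub, j])) = G m sub sub2
    rw [PySem.List.foldl_congr_mem _ _ (fun acc i => acc ++ pvRow m i 0) _ (fun acc i _ => hinner acc i)]
    rw [PySem.List.foldl_append_eq_flatMap]
    rw [G_lt m sub sub2 (by omega)]
    rfl

-- ===== VERDICT (by name: the statement is the Claim_ definition above) =====
theorem espacio_aux_spec : Claim_equal_espacio_aux := by
  intro matriz sub sub2 _ hp
  unfold Spec_espacio_aux espacio_aux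
  rw [keyA matriz _ sub sub2 hp (by unfold msr; omega),
      keyB matriz sub sub2 (by rcases hp with h | h <;> omega)]
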